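-- pv_equiv track=rewrite | github.com/xxxxCham/backtest_core | ui/components/model_selector.py | _resolve_selectbox_value
-- ===== SOURCE A (Python) =====
-- from typing import Dict, Iterable, List, Optional, Sequence, Tuple
--
-- def _resolve_selectbox_value(
--     models: Sequence[str],
--     current_value: str,
--     stored_value: str,
-- ) -> str:
--     normalized_current = _normalize_model_name(str(current_value or "").strip())
--     normalized_stored = _normalize_model_name(str(stored_value or "").strip())
--
--     for candidate in models:
--         normalized_candidate = _normalize_model_name(str(candidate))
--         if normalized_candidate == normalized_current and normalized_current:
--             return str(candidate)
--     for candidate in models: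
--         normalized_candidate = _normalize_model_name(str(candidate))
--         if normalized_candidate == normalized_stored and normalized_stored:
--             return str(candidate)
--     return str(models[0]) if models else ""
--
-- def _normalize_model_name(name: str) -> str:
--     if name.endswith(":latest"):
--         return name.rsplit(":", 1)[0]
--     return name
-- ===== SOURCE B (Python) =====
-- def _normalize_model_name(name: str) -> str:
--     if name.endswith(":latest"):
--         return name.rsplit(":", 1)[0]
--     return name
--
--
-- def _resolve_selectbox_value(models, current_value, stored_value):
--     # Single pass with an accumulator: track the first current-match, the first
--     # stored-match and the first element simultaneously, decide once at the end.
--     nc = _normalize_model_name(str(current_value or "").strip())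
--     ns = _normalize_model_name(str(stored_value or "").strip())
--     first = None
--     cur_hit = None
--     sto_hit = None
--     for candidate in models:
--         c = str(candidate)
--         if first is None:
--             first = c
--         n = _normalize_model_name(c)
--         if cur_hit is None and nc and n == nc:
--             cur_hit = c
--         if sto_hit is None and ns and n == ns:
--             sto_hit = c
--     if cur_hit is not None:
--         return cur_hit
--     if sto_hit is not None:
--         return sto_hit
--     return first if first is not None else ""
-- ===== Notes on version B (the rewrite author's own statement) =====
-- stated objective: alternative
-- what changed: A's two staged early-return scans over models are replaced by one single pass that simultaneously accumulates the first current-match, the first stored-match and the first element, with one decision at the end.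
import Mathlib
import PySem

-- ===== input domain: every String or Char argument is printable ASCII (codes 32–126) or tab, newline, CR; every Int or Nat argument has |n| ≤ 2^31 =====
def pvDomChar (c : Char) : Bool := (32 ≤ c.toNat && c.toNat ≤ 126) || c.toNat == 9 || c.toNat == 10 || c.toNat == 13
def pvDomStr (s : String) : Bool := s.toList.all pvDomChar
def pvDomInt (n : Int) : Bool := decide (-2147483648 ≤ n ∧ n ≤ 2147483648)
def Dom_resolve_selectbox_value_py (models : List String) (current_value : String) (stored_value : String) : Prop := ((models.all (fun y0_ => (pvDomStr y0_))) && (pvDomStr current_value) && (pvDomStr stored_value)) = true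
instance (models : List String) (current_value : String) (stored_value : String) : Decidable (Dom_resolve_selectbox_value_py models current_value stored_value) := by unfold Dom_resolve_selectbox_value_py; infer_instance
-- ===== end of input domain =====

-- B replaces A's two staged early-return scans by one single pass that accumulates the
-- first current-match, first stored-match and first element, deciding once at the end
-- (alternative decomposition; same asymptotic cost).


-- ===== PORT A =====
-- name.rsplit(":", 1)[0] — everything before the LAST ':' (the whole string if no ':').
-- Exact hand port: PySem has no rsplit; under the endswith-":latest" guard a ':' is present.
def pvRsplitColonHead (cs : List Char) : List Char :=
  match cs.reverse.dropWhile (fun c => c ≠ ':') with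
  | [] => cs                    -- no ':' in the string: rsplit returns [name]
  | _ :: rest => rest.reverse   -- drop the last ':' and its tail

-- _normalize_model_name (shared helper of A and B, exactly as in both Pythons)
def pvNormalizeModelName (name : String) : String :=
  if PySem.Str.endswith name ":latest" then String.ofList (pvRsplitColonHead name.toList)
  else name

-- A's 'for candidate in models: … return str(candidate)' loop, early return as Option
def pvLoopA (models : List String) (target : String) : Option String :=
  match models with
  | [] => none
  | candidate :: rest =>
      if pvNormalizeModelName candidate = target ∧ target ≠ "" then some candidate
      else pvLoopA rest target

-- str(x or "") on a str is x itself ("" or "" == ""), so it is ported as the identity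
def resolve_selectbox_value_py (models : List String) (current_value : String) (stored_value : String) : String :=
  let normalized_current := pvNormalizeModelName (PySem.Str.strip current_value)
  let normalized_stored := pvNormalizeModelName (PySem.Str.strip stored_value)
  match pvLoopA models normalized_current with
  | some r => r
  | none =>
    match pvLoopA models normalized_stored with
    | some r => r
    | none => match models with
              | [] => ""
              | m :: _ => m

-- ===== PORT B =====
-- one step of B's single-pass loop over (first, cur_hit, sto_hit)
def pvStepB (nc ns : String) (st : Option String × Option String × Option String)
    (c : String) : Option String × Option String × Option String :=
  let first := if st.1.isNone then some c else st.1
  let n := pvNormalizeModelName c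
  let cur := if st.2.1.isNone ∧ nc ≠ "" ∧ n = nc then some c else st.2.1
  let sto := if st.2.2.isNone ∧ ns ≠ "" ∧ n = ns then some c else st.2.2
  (first, cur, sto)

def resolve_selectbox_value_py_alt (models : List String) (current_value : String) (stored_value : String) : String :=
  let nc := pvNormalizeModelName (PySem.Str.strip current_value)
  let ns := pvNormalizeModelName (PySem.Str.strip stored_value)
  let st := models.foldl (pvStepB nc ns) (none, none, none)
  match st.2.1 with
  | some r => r
  | none =>
    match st.2.2 with
    | some r => r
    | none => st.1.getD ""

-- ===== PRECONDITION & SPEC =====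
def Spec_resolve_selectbox_value_py (models : List String) (current_value : String) (stored_value : String) (out : String) : Prop := out = resolve_selectbox_value_py_alt models current_value stored_value
instance (models : List String) (current_value : String) (stored_value : String) (out : String) : Decidable (Spec_resolve_selectbox_value_py models current_value stored_value out) := by unfold Spec_resolve_selectbox_value_py; infer_instance

-- ===== CLAIM (what is proved, stated in full; the proofs are below) =====
def Claim_equal_resolve_selectbox_value_py : Prop := ∀ (models : List String) (current_value : String) (stored_value : String), Dom_resolve_selectbox_value_py models current_value stored_value → Spec_resolve_selectbox_value_py models current_value stored_value (resolve_selectbox_value_py models current_value stored_value)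

-- ===== LEMMAS AND PROOFS =====

-- B's fold, characterised component-wise: each slot keeps its value once set,
-- otherwise takes the first element / the first match in the rest of the list.
theorem pv_foldB_eq (nc ns : String) (ms : List String)
    (f c s : Option String) :
    ms.foldl (pvStepB nc ns) (f, c, s)
      = (f.or ms.head?,
         c.or (if nc ≠ "" then ms.find? (fun m => pvNormalizeModelName m == nc) else none),
         s.or (if ns ≠ "" then ms.find? (fun m => pvNormalizeModelName m == ns) else none)) := by
  induction ms generalizing f c s with
  | nil => simp
  | cons m rest ih =>
      simp only [List.foldl_cons, ih, pvStepB, List.head?_cons, List.find?_cons]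
      refine Prod.ext ?_ (Prod.ext ?_ ?_)
      · cases f <;> simp [Option.or]
      · by_cases hc : nc = ""
        · cases c <;> simp [hc, Option.or]
        · by_cases hm : pvNormalizeModelName m = nc
          · cases c <;> simp [Option.or, hc, hm]
          · cases c <;> simp [Option.or, hc, hm, beq_eq_false_iff_ne.mpr hm]
      · by_cases hs : ns = ""
        · cases s <;> simp [hs, Option.or]
        · by_cases hm : pvNormalizeModelName m = ns
          · cases s <;> simp [Option.or, hs, hm]
          · cases s <;> simp [Option.or, hs, hm, beq_eq_false_iff_ne.mpr hm]

-- A's early-return scan is the first match, guarded by target ≠ ""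
theorem pv_loopA_eq (ms : List String) (t : String) :
    pvLoopA ms t = (if t ≠ "" then ms.find? (fun m => pvNormalizeModelName m == t) else none) := by
  induction ms with
  | nil => simp [pvLoopA]
  | cons m rest ih =>
      simp only [pvLoopA, List.find?_cons, ih]
      by_cases ht : t = ""
      · simp [ht]
      · by_cases hm : pvNormalizeModelName m = t
        · simp [hm, ht]
        · simp [hm, ht, beq_eq_false_iff_ne.mpr hm]

-- ===== VERDICT (by name: the statement is the Claim_ definition above) =====
theorem resolve_selectbox_value_py_spec : Claim_equal_resolve_selectbox_value_py := by
  intro models current_value stored_value _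
  unfold Spec_resolve_selectbox_value_py resolve_selectbox_value_py resolve_selectbox_value_py_alt
  simp only [pv_foldB_eq, pv_loopA_eq, Option.none_or]
  cases hfc : (if pvNormalizeModelName (PySem.Str.strip current_value) ≠ "" then
      models.find? (fun m => pvNormalizeModelName m == pvNormalizeModelName (PySem.Str.strip current_value)) else none) with
  | some r => simp
  | none =>
    cases hfs : (if pvNormalizeModelName (PySem.Str.strip stored_value) ≠ "" then
        models.find? (fun m => pvNormalizeModelName m == pvNormalizeModelName (PySem.Str.strip stored_value)) else none) with
    | some r => simp
    | none => cases models <;> simp
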